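-- pv_equiv track=rewrite | github.com/itc-n23027/PG2 | TextBook/CH07/restrip.py | custom_strip
-- ===== SOURCE A (Python) =====
-- def custom_strip(s, chars=None):
--     if chars is None:
--         chars = ' \t\n\r\x0b\x0c'
--
--     start = 0
--     end = len(s) - 1
--
--     while start <= end and s[start] in chars:
--         start += 1
--
--     while end >= start and s[end] in chars:
--         end -= 1
--
--     return s[start:end+1]
-- ===== SOURCE B (Python) =====
-- def custom_strip(s, chars=None):
--     if chars is None:
--         chars = ' \t\n\r\x0b\x0c'
--
--     first = None
--     last = 0
--     for i, c in enumerate(s):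
--         if c not in chars:
--             if first is None:
--                 first = i
--             last = i
--
--     if first is None:
--         return s[:0]
--     return s[first:last + 1]
-- ===== Notes on version B (the rewrite author's own statement) =====
-- stated objective: alternative
-- what changed: Replaces A's two converging index-based end-scans by a single forward pass with enumerate that records the first and last non-strippable positions, then returns one slice.
import Mathlib
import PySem

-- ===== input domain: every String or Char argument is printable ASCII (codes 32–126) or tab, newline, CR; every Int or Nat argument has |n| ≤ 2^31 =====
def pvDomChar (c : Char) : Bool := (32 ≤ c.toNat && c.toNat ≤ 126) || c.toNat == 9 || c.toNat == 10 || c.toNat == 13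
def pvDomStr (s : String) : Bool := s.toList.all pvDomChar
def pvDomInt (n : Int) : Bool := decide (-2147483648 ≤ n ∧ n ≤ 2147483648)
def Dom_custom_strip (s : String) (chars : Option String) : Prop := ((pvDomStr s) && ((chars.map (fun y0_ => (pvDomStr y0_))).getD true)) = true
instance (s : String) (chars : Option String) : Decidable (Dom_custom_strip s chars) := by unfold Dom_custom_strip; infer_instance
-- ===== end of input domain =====

-- B replaces A's two converging end-scans by one forward pass with enumerate that
-- records the first and last kept positions, then takes one slice (objective: alternative).

-- ===== PORT A =====
-- first while loop: start moves right while s[start] is in chars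
-- ('s[start] in chars' for the single character s[start] is exactly list membership;
--  the loop guard keeps the index in range, so pyGetD's default is never used)
def stripLoopStart (cs l : List Char) (endI : Int) (start : Nat) : Nat :=
  if h : (start : Int) ≤ endI ∧ cs.contains (PySem.List.pyGetD l (start : Int) ' ') = true then
    stripLoopStart cs l endI (start + 1)
  else start
termination_by (endI + 1 - start).toNat
decreasing_by omega

-- second while loop: end moves left while end >= start and s[end] is in chars
def stripLoopEnd (cs l : List Char) (start : Nat) (endI : Int) : Int :=
  if h : (start : Int) ≤ endI ∧ cs.contains (PySem.List.pyGetD l endI ' ') = true then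
    stripLoopEnd cs l start (endI - 1)
  else endI
termination_by (endI + 1 - start).toNat
decreasing_by omega

def custom_strip (s : String) (chars : Option String) : String :=
  let cs := (chars.getD " \t\n\r\x0B\x0C").toList
  let l := s.toList
  let start := stripLoopStart cs l ((l.length : Int) - 1) 0
  let endI := stripLoopEnd cs l start ((l.length : Int) - 1)
  PySem.Str.slice s (some (start : Int)) (some (endI + 1))

-- ===== PORT B =====
-- one fold over enumerate(s): state = (index of first kept char if any, index of last kept char)
def stripStep (cs : List Char) (st : Option Int × Int) (ic : Int × Char) : Option Int × Int :=
  if cs.contains ic.2 then st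
  else (some (st.1.getD ic.1), ic.1)

def custom_strip_alt (s : String) (chars : Option String) : String :=
  let cs := (chars.getD " \t\n\r\x0B\x0C").toList
  let res := (PySem.List.enumerate s.toList 0).foldl (stripStep cs) (none, 0)
  match res.1 with
  | none => PySem.Str.slice s none (some 0)
  | some f => PySem.Str.slice s (some f) (some (res.2 + 1))

-- ===== PRECONDITION & SPEC =====
def Spec_custom_strip (s : String) (chars : Option String) (out : String) : Prop := out = custom_strip_alt s chars
instance (s : String) (chars : Option String) (out : String) : Decidable (Spec_custom_strip s chars out) := by unfold Spec_custom_strip; infer_instance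

-- ===== CLAIM (what is proved, stated in full; the proofs are below) =====
def Claim_equal_custom_strip : Prop := ∀ (s : String) (chars : Option String), Dom_custom_strip s chars → Spec_custom_strip s chars (custom_strip s chars)

-- ===== LEMMAS AND PROOFS =====

-- A's first loop computes the length of the strippable prefix
theorem stripLoopStart_eq (cs l : List Char) (i : Nat) (hi : i ≤ l.length) :
    stripLoopStart cs l ((l.length : Int) - 1) i
      = i + ((l.drop i).takeWhile (fun c => cs.contains c)).length := by
  generalize hn : l.length - i = n
  induction n generalizing i with
  | zero =>
    have heq : i = l.length := by omega
    rw [stripLoopStart, dif_neg (by rintro ⟨h,-⟩; omega)]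
    subst heq; simp
  | succ n ih =>
    have hlt : i < l.length := by omega
    have hget : PySem.List.pyGetD l (i : Int) ' ' = l[i] := by
      rw [PySem.List.pyGetD_eq_getElem l ' ' (by omega) (by exact_mod_cast hlt)]
      simp
    rw [stripLoopStart]
    rw [List.drop_eq_getElem_cons hlt, List.takeWhile_cons]
    by_cases hc : cs.contains l[i] = true
    · rw [dif_pos ⟨by omega, by rw [hget]; exact hc⟩, hc]
      rw [ih (i+1) (by omega) (by omega)]
      simp; omega
    · rw [dif_neg (by rw [hget]; tauto), if_neg hc]
      simp

-- A's second loop computes last-kept-index within the prefix take (k+1), as an Int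
theorem stripLoopEnd_eq (cs l : List Char) (a : Nat) (e : Int)
    (h0 : -1 ≤ e) (h1 : e < (l.length : Int)) :
    stripLoopEnd cs l a e
      = e - (((l.take (e + 1).toNat).drop a).reverse.takeWhile (fun c => cs.contains c)).length := by
  generalize hn : (e + 1).toNat = n
  induction n generalizing e with
  | zero =>
    have he : e = -1 := by omega
    subst he
    rw [stripLoopEnd, dif_neg (by rintro ⟨h,-⟩; omega)]
    simp
  | succ n ih =>
    have he0 : 0 ≤ e := by omega
    have hel : e.toNat < l.length := by omega
    have hne : n = e.toNat := by omega
    subst hne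
    have hget : PySem.List.pyGetD l e ' ' = l[e.toNat] := by
      rw [PySem.List.pyGetD_eq_getElem l ' ' he0 h1]
    have hdec : l.take (e.toNat + 1) = l.take e.toNat ++ [l[e.toNat]] := by
      rw [List.take_add_one]
      simp [List.getElem?_eq_getElem hel]
    by_cases ha : (a : Int) ≤ e
    · have hdrop : (l.take (e.toNat + 1)).drop a = (l.take e.toNat).drop a ++ [l[e.toNat]] := by
        rw [hdec, List.drop_append_of_le_length (by simp; omega)]
      by_cases hc : l[e.toNat] ∈ cs
      · rw [stripLoopEnd, dif_pos ⟨ha, by rw [hget]; simpa using hc⟩]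
        rw [ih (e - 1) (by omega) (by omega) (by omega)]
        rw [hdrop, List.reverse_append]
        simp [hc]
        omega
      · rw [stripLoopEnd, dif_neg (by rintro ⟨-, h⟩; rw [hget] at h; simp at h; exact hc h)]
        rw [hdrop, List.reverse_append]
        simp [hc]
    · rw [stripLoopEnd, dif_neg (by rintro ⟨h,-⟩; omega)]
      have hnil : (l.take (e.toNat + 1)).drop a = [] := by
        apply List.drop_eq_nil_of_le
        simp; omega
      rw [hnil]
      simp

theorem len_takeWhile_ne_of_dropWhile_ne_nil {α : Type} (p : α → Bool) (xs : List α)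
    (h : xs.dropWhile p ≠ []) : ¬ (xs.takeWhile p).length = xs.length := by
  have h2 := List.takeWhile_append_dropWhile (p := p) (l := xs)
  have h3 := congrArg List.length h2
  rw [List.length_append] at h3
  have h4 : (xs.dropWhile p).length ≠ 0 := by simpa using h
  omega

-- B's fold, characterised
theorem fold_stripStep_eq (cs : List Char) (xs : List Char) (t : Int) (st : Option Int × Int) :
    (PySem.List.enumerate xs t).foldl (stripStep cs) st
      = if (xs.dropWhile (fun c => cs.contains c)) = [] then st
        else (some (st.1.getD (t + ((xs.takeWhile (fun c => cs.contains c)).length : Int))),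
              t + (xs.length : Int) - 1 - ((xs.reverse.takeWhile (fun c => cs.contains c)).length : Int)) := by
  induction xs using List.reverseRecOn generalizing st with
  | nil => simp [PySem.List.enumerate_nil]
  | append_singleton xs c ih =>
    rw [PySem.List.enumerate_append, List.foldl_append, ih,
        PySem.List.enumerate_cons, PySem.List.enumerate_nil]
    simp only [List.foldl_cons, List.foldl_nil]
    by_cases hc : c ∈ cs
    · by_cases hxs : xs.dropWhile (fun c => cs.contains c) = []
      · have hall : (xs ++ [c]).dropWhile (fun c => cs.contains c) = [] := by
          rw [List.dropWhile_eq_nil_iff] at hxs ⊢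
          intro x hx
          rcases List.mem_append.mp hx with h | h
          · exact hxs x h
          · simp at h; subst h; simpa using hc
        rw [if_pos hxs, if_pos hall]
        simp [stripStep, hc]
      · have hne : (xs ++ [c]).dropWhile (fun c => cs.contains c) ≠ [] := by
          intro h
          exact hxs (List.dropWhile_eq_nil_iff.mpr (fun x hx =>
            (List.dropWhile_eq_nil_iff.mp h) x (List.mem_append.mpr (Or.inl hx))))
        rw [if_neg hxs, if_neg hne]
        have hlen := len_takeWhile_ne_of_dropWhile_ne_nil (fun c => cs.contains c) xs hxs
        rw [List.takeWhile_append, if_neg hlen]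
        simp [stripStep, hc]
        ring
    · have hne : (xs ++ [c]).dropWhile (fun c => cs.contains c) ≠ [] := by
        intro h
        have := (List.dropWhile_eq_nil_iff.mp h) c (List.mem_append.mpr (Or.inr (by simp)))
        simp at this; exact hc this
      rw [if_neg hne]
      by_cases hxs : xs.dropWhile (fun c => cs.contains c) = []
      · have htw : xs.takeWhile (fun c => cs.contains c) = xs := by
          have h2 := List.takeWhile_append_dropWhile (p := fun c => cs.contains c) (l := xs)
          rw [hxs, List.append_nil] at h2; exact h2
        rw [if_pos hxs, List.takeWhile_append, if_pos (by rw [htw])]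
        simp [stripStep, hc]
        ring
      · have hlen := len_takeWhile_ne_of_dropWhile_ne_nil (fun c => cs.contains c) xs hxs
        rw [if_neg hxs, List.takeWhile_append, if_neg hlen]
        simp [stripStep, hc]
        ring

-- ===== VERDICT (by name: the statement is the Claim_ definition above) =====
theorem custom_strip_spec : Claim_equal_custom_strip := by
  intro s chars _
  show custom_strip s chars = custom_strip_alt s chars
  unfold custom_strip custom_strip_alt
  set cs := (chars.getD " \t\n\r\x0B\x0C").toList with hcs
  set l := s.toList with hl
  have hstart := stripLoopStart_eq cs l 0 (by omega)
  rw [List.drop_zero, Nat.zero_add] at hstart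
  set a := (l.takeWhile (fun c => cs.contains c)).length with ha
  have hend := stripLoopEnd_eq cs l a ((l.length : Int) - 1) (by omega) (by omega)
  have hTN : ((l.length : Int) - 1 + 1).toNat = l.length := by omega
  rw [hTN, List.take_length] at hend
  have hfold := fold_stripStep_eq cs l 0 (none, 0)
  have hsplit : l.takeWhile (fun c => cs.contains c) ++ l.dropWhile (fun c => cs.contains c) = l :=
    List.takeWhile_append_dropWhile
  have hdropa : l.drop a = l.dropWhile (fun c => cs.contains c) := by
    conv_lhs => rw [← hsplit]
    rw [ha, List.drop_left]
  have hRle : ((l.drop a).reverse.takeWhile (fun c => cs.contains c)).length ≤ l.length := by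
    have h1 := (List.takeWhile_sublist (l := (l.drop a).reverse) (fun c => cs.contains c)).length_le
    simp only [List.length_reverse, List.length_drop] at h1
    omega
  by_cases hdw : l.dropWhile (fun c => cs.contains c) = []
  · -- everything strippable: both sides are the empty slice
    rw [if_pos hdw] at hfold
    have haL : a = l.length := by
      have hlen := congrArg List.length hsplit
      rw [hdw] at hlen
      rw [List.length_append, List.length_nil] at hlen
      omega
    simp only [hstart, hend, hfold]
    simp only [PySem.Str.slice]
    congr 1
    show PySem.List.slice l _ _ = PySem.List.slice l _ _
    rw [PySem.List.slice_toNat l (by omega) (by omega), PySem.List.slice_to l (by omega)]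
    rw [Int.toNat_natCast, haL, List.drop_length]
    simp
  · -- some character is kept
    rw [if_neg hdw] at hfold
    have hdwr : (l.dropWhile (fun c => cs.contains c)).reverse.dropWhile (fun c => cs.contains c) ≠ [] := by
      intro hn
      have hhead := List.head_dropWhile_not (fun c => cs.contains c) hdw
      have hmem : (l.dropWhile (fun c => cs.contains c)).head hdw ∈
          (l.dropWhile (fun c => cs.contains c)).reverse := by
        rw [List.mem_reverse]; exact List.head_mem hdw
      have h5 := (List.dropWhile_eq_nil_iff.mp hn) _ hmem
      rw [hhead] at h5; exact absurd h5 (by simp)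
    have hxs2 : ((l.drop a).reverse).dropWhile (fun c => cs.contains c) ≠ [] := by
      rw [hdropa]; exact hdwr
    have hne2 := len_takeWhile_ne_of_dropWhile_ne_nil (fun c => cs.contains c)
      ((l.drop a).reverse) hxs2
    have hR : l.reverse.takeWhile (fun c => cs.contains c)
        = (l.drop a).reverse.takeWhile (fun c => cs.contains c) := by
      conv_lhs => rw [← hsplit, List.reverse_append, ← hdropa]
      rw [List.takeWhile_append, if_neg hne2]
    simp only [hstart, hend, hfold]
    simp only [PySem.Str.slice]
    congr 2
    · simp [ha]
    · rw [hR]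
      ring_nf
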